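-- pv_equiv track=rewrite | github.com/hdibbo/CS7641_A2 | algorithm.py | sparse_peaks_fitness
-- ===== SOURCE A (Python) =====
-- def sparse_peaks_fitness(bit_string):
--     fitness = 0
--     current_run = 0
--
--     for bit in bit_string:
--         if bit == 1:
--             current_run += 1
--         else:
--             if current_run == 1:
--                 fitness += 10  # Reward isolated peaks
--             elif current_run > 1:
--                 fitness -= 5  # Penalize runs longer than 1
--             current_run = 0
--
--     if current_run == 1:
--         fitness += 10
--     elif current_run > 1:
--         fitness -= 5
--
--     return fitness
-- ===== SOURCE B (Python) =====
-- def sparse_peaks_fitness(bit_string):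
--     total = 0
--     for prev, cur, nxt in zip([0] + bit_string, bit_string, bit_string[1:] + [0]):
--         if cur == 1 and prev != 1:
--             total += 10 if nxt != 1 else -5
--     return total
-- ===== Notes on version B (the rewrite author's own statement) =====
-- stated objective: simpler
-- what changed: Replaced the explicit current_run counter with its duplicated after-loop tail handling by a single zip over (previous, current, next) triples that scores each run of 1s at its first element.
import Mathlib
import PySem

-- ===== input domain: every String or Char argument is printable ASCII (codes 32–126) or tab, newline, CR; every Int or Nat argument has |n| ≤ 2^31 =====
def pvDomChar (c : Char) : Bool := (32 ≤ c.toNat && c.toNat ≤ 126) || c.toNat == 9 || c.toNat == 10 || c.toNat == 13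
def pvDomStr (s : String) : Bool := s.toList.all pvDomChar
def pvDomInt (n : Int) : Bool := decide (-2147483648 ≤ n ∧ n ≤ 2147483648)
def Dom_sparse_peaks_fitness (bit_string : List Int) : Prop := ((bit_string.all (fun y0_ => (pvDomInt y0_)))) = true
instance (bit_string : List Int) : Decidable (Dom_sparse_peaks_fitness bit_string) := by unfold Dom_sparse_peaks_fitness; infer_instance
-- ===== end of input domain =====

-- B replaces A's run-length counter and duplicated tail handling by one zip over
-- (previous, current, next) triples, scoring each run of 1s at its first element (objective: simpler).

-- ===== PORT A =====
-- state: (fitness, current_run); tail handling after the loop as in A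
def sparse_peaks_fitness (bit_string : List Int) : Int :=
  let s := bit_string.foldl
    (fun (st : Int × Int) bit =>
      if bit == 1 then (st.1, st.2 + 1)
      else ((if st.2 == 1 then st.1 + 10 else if st.2 > 1 then st.1 - 5 else st.1), 0))
    (0, 0)
  if s.2 == 1 then s.1 + 10 else if s.2 > 1 then s.1 - 5 else s.1

-- ===== PORT B =====
-- zip([0]+bit_string, bit_string, bit_string[1:]+[0]) (zip truncates to the shortest, as List.zip)
def sparse_peaks_fitness_alt (bit_string : List Int) : Int :=
  (List.zip ((0 : Int) :: bit_string) (List.zip bit_string (bit_string.drop 1 ++ [0]))).foldl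
    (fun total pcn =>
      if pcn.2.1 == 1 && pcn.1 != 1 then total + (if pcn.2.2 != 1 then 10 else -5) else total)
    0

-- ===== PRECONDITION & SPEC =====
def Spec_sparse_peaks_fitness (bit_string : List Int) (out : Int) : Prop := out = sparse_peaks_fitness_alt bit_string
instance (bit_string : List Int) (out : Int) : Decidable (Spec_sparse_peaks_fitness bit_string out) := by unfold Spec_sparse_peaks_fitness; infer_instance

-- ===== CLAIM (what is proved, stated in full; the proofs are below) =====
def Claim_equal_sparse_peaks_fitness : Prop := ∀ (bit_string : List Int), Dom_sparse_peaks_fitness bit_string → Spec_sparse_peaks_fitness bit_string (sparse_peaks_fitness bit_string)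

-- ===== LEMMAS AND PROOFS =====

-- recursive reading of A's loop including the tail handling
def aGo : List Int → Int → Int → Int
  | [], f, r => if r == 1 then f + 10 else if r > 1 then f - 5 else f
  | c :: rest, f, r =>
      if c == 1 then aGo rest f (r + 1)
      else aGo rest (if r == 1 then f + 10 else if r > 1 then f - 5 else f) 0

-- recursive reading of B's zipped loop: p1 = "previous bit was 1"
def bGo : Bool → List Int → Int
  | _, [] => 0
  | p1, c :: rest =>
      (if c == 1 && !p1 then (if ((rest.headD 0) != 1) then (10 : Int) else -5) else 0) + bGo (c == 1) rest

lemma aGo_foldl (l : List Int) (f r : Int) :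
    (let s := l.foldl
        (fun (st : Int × Int) bit =>
          if bit == 1 then (st.1, st.2 + 1)
          else ((if st.2 == 1 then st.1 + 10 else if st.2 > 1 then st.1 - 5 else st.1), 0))
        (f, r)
     if s.2 == 1 then s.1 + 10 else if s.2 > 1 then s.1 - 5 else s.1) = aGo l f r := by
  induction l generalizing f r with
  | nil => simp [aGo]
  | cons c rest ih =>
      simp only [List.foldl_cons, aGo]
      by_cases hc : c == 1 <;> simp [hc, ← ih]

lemma bGo_foldl (l : List Int) (prev acc : Int) :
    (List.zip (prev :: l) (List.zip l (l.drop 1 ++ [0]))).foldl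
      (fun total pcn =>
        if pcn.2.1 == 1 && pcn.1 != 1 then total + (if pcn.2.2 != 1 then 10 else -5) else total)
      acc = acc + bGo (prev == 1) l := by
  induction l generalizing prev acc with
  | nil => simp [bGo]
  | cons c rest ih =>
      have hzip : List.zip (c :: rest) ((c :: rest).drop 1 ++ [0])
          = (c, rest.headD 0) :: List.zip rest (rest.drop 1 ++ [0]) := by
        cases rest <;> simp
      rw [hzip]
      simp only [List.zip_cons_cons, List.foldl_cons, bGo, ih]
      by_cases hcc : c = 1 <;> by_cases hp : prev = 1 <;>
        simp [hcc, hp] <;> split_ifs <;> ring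

-- pending contribution of A's unfinished run of length r, given the rest of the list
def pend (l : List Int) (r : Int) : Int :=
  if r = 0 then 0 else if r = 1 then (if l.headD 0 = 1 then -5 else 10) else -5

lemma main_inv (l : List Int) (f r : Int) (hr : 0 ≤ r) :
    aGo l f r = f + pend l r + bGo (decide (r ≠ 0)) l := by
  induction l generalizing f r with
  | nil =>
      simp only [aGo, bGo, pend]
      rcases lt_trichotomy r 1 with h | h | h
      · have : r = 0 := by omega
        simp [this]
      · simp [h]
      · have h1 : ¬ (r == 1) = true := by simp; omega
        have h0 : r ≠ 0 := by omega
        simp [h1, h0, show r > 1 from h, show ¬ r = 1 by omega]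
        ring
  | cons c rest ih =>
      simp only [aGo]
      by_cases hc : (c == 1) = true
      · have hc1 : c = 1 := by simpa using hc
        rw [ih f (r + 1) (by omega)]
        have hne : r + 1 ≠ 0 := by omega
        simp only [bGo, hc, hc1]
        rcases lt_trichotomy r 1 with h | h | h
        · have h0 : r = 0 := by omega
          simp only [h0, pend]
          by_cases hh : rest.headD 0 = 1 <;> simp [hh] <;> ring
        · simp [h, pend, hne, show r ≠ 0 by omega, show ¬ (r+1) = 1 by omega,
                show r + 1 ≠ 0 by omega]
        · simp [pend, hne, show r ≠ 0 by omega, show ¬ r = 1 by omega,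
                show ¬ (r+1) = 1 by omega, show ¬ (r+1) = 0 by omega]
      · have hcne : c ≠ 1 := by simpa using hc
        rw [ih _ 0 le_rfl]
        simp only [bGo, hc, pend]
        rcases lt_trichotomy r 1 with h | h | h
        · have h0 : r = 0 := by omega
          simp [h0]
        · simp [h, hcne, show (1:Int) ≠ 0 by norm_num]
        · simp [hcne, show ¬ r = 1 by omega, show r > 1 from h, show r ≠ 0 by omega]
          ring

-- ===== VERDICT (by name: the statement is the Claim_ definition above) =====
theorem sparse_peaks_fitness_spec : Claim_equal_sparse_peaks_fitness := by
  intro l _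
  show sparse_peaks_fitness l = sparse_peaks_fitness_alt l
  unfold sparse_peaks_fitness sparse_peaks_fitness_alt
  rw [aGo_foldl, bGo_foldl, main_inv l 0 0 le_rfl]
  simp [pend]
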